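-- pv_equiv track=rewrite | github.com/Abstractize/GoalKeeper | Goal Keeper.py | elementos_aux
-- ===== SOURCE A (Python) =====
-- def elementos_aux(string,nombre,lista):#Función recursiva
--     if string=="":
--         lista.append(nombre)
--         return lista
--     else:
--         if string[0]=="\t":#Encuentra el delimitador y separa
--             lista.append(nombre)
--             return elementos_aux(string[1:],"",lista)#Retorna a la recursiva
--         else:
--             nombre+=string[0]
--             return elementos_aux(string[1:],nombre,lista)#Retorna a la recursiva
-- ===== SOURCE B (Python) =====
-- def elementos_aux(string, nombre, lista):
--     # Iterative: one pass with a current-token accumulator (mutates lista like A)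
--     current = nombre
--     for ch in string:
--         if ch == "\t":
--             lista.append(current)
--             current = ""
--         else:
--             current += ch
--     lista.append(current)
--     return lista
-- ===== Notes on version B (the rewrite author's own statement) =====
-- stated objective: faster
-- what changed: Replaces the recursive character-by-character splitter (which rebuilds string[1:] at each recursive call) with a single explicit loop over the characters using a current-token accumulator.
import Mathlib
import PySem

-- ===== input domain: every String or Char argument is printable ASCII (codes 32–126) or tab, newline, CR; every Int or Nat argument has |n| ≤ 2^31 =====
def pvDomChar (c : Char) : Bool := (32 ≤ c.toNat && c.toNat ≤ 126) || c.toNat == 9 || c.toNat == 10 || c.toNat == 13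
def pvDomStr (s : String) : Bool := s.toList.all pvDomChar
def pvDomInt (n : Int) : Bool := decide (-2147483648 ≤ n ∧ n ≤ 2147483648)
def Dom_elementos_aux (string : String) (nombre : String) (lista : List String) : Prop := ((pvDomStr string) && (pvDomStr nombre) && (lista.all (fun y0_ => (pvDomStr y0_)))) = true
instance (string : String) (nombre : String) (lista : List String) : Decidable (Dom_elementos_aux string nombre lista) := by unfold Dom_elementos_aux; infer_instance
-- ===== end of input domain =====

-- B replaces A's recursion with one explicit loop over the characters (simpler decomposition);
-- equivalence is about the returned value (both Pythons append to the same `lista` in place).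

-- ===== PORT A =====
-- A's recursion, step for step, over the string's characters (string[0] / string[1:] = head / tail).
def elementosAuxA : List Char → String → List String → List String
  | [], nombre, lista => lista ++ [nombre]
  | c :: rest, nombre, lista =>
    if c = '\t' then elementosAuxA rest "" (lista ++ [nombre])
    else elementosAuxA rest (nombre.push c) lista

def elementos_aux (string : String) (nombre : String) (lista : List String) : List String :=
  elementosAuxA string.toList nombre lista

-- ===== PORT B =====
-- B's loop: fold over the characters with (lista, current) state, then append the last token.
def elementos_aux_alt (string : String) (nombre : String) (lista : List String) : List String :=
  let p := string.toList.foldl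
    (fun (acc : List String × String) ch =>
      if ch = '\t' then (acc.1 ++ [acc.2], "") else (acc.1, acc.2.push ch))
    (lista, nombre)
  p.1 ++ [p.2]

-- ===== PRECONDITION & SPEC =====
def Spec_elementos_aux (string : String) (nombre : String) (lista : List String) (out : List String) : Prop := out = elementos_aux_alt string nombre lista
instance (string : String) (nombre : String) (lista : List String) (out : List String) : Decidable (Spec_elementos_aux string nombre lista out) := by unfold Spec_elementos_aux; infer_instance

-- ===== CLAIM (what is proved, stated in full; the proofs are below) =====
def Claim_equal_elementos_aux : Prop := ∀ (string : String) (nombre : String) (lista : List String), Dom_elementos_aux string nombre lista → Spec_elementos_aux string nombre lista (elementos_aux string nombre lista)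

-- ===== LEMMAS AND PROOFS =====
theorem elementosAuxA_eq_fold (cs : List Char) (nombre : String) (lista : List String) :
    elementosAuxA cs nombre lista =
      (cs.foldl
        (fun (acc : List String × String) ch =>
          if ch = '\t' then (acc.1 ++ [acc.2], "") else (acc.1, acc.2.push ch))
        (lista, nombre)).1 ++
      [(cs.foldl
        (fun (acc : List String × String) ch =>
          if ch = '\t' then (acc.1 ++ [acc.2], "") else (acc.1, acc.2.push ch))
        (lista, nombre)).2] := by
  induction cs generalizing nombre lista with
  | nil => simp [elementosAuxA]
  | cons c rest ih =>
    by_cases h : c = '\t' <;> simp [elementosAuxA, h, ih]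

-- ===== VERDICT (by name: the statement is the Claim_ definition above) =====
theorem elementos_aux_spec : Claim_equal_elementos_aux := by
  intro string nombre lista _
  unfold Spec_elementos_aux elementos_aux elementos_aux_alt
  exact elementosAuxA_eq_fold string.toList nombre lista
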